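-- pv_equiv track=rewrite | github.com/Collin8432/Invisible | utils/web.py | checkPerms
-- ===== SOURCE A (Python) =====
-- from operator import contains
--
-- def checkPerms(perms: str) -> bool:
--    ALL_PERMS = {
--       "CREATE_INSTANT_INVITE": 0x1,
--       "KICK_MEMBERS": 0x2,
--       "BAN_MEMBERS": 0x4,
--       "ADMINISTRATOR": 0x8,
--       "MANAGE_CHANNELS": 0x10,
--       "MANAGE_GUILD": 0x20,
--       "ADD_REACTIONS": 0x40,
--       "VIEW_AUDIT_LOG": 0x80,
--       "PRIORITY_SPEAKER": 0x100,
--       "STREAM": 0x200,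
--       "VIEW_CHANNEL": 0x400,
--       "SEND_MESSAGES": 0x800,
--       "SEND_TTS_MESSAGES": 0x1000,
--       "MANAGE_MESSAGES": 0x2000,
--       "EMBED_LINKS": 0x4000,
--       "ATTACH_FILES": 0x8000,
--       "READ_MESSAGE_HISTORY": 0x10000,
--       "MENTION_EVERYONE": 0x20000,
--       "USE_EXTERNAL_EMOJIS": 0x40000,
--       "VIEW_GUILD_INSIGHTS": 0x80000,
--       "CONNECT": 0x100000,
--       "SPEAK": 0x200000,
--       "MUTE_MEMBERS": 0x400000,
--       "DEAFEN_MEMBERS": 0x800000,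
--       "MOVE_MEMBERS": 0x1000000,
--       "USE_VAD": 0x2000000,
--       "CHANGE_NICKNAME": 0x4000000,
--       "MANAGE_NICKNAMES": 0x8000000,
--       "MANAGE_ROLES": 0x10000000,
--       "MANAGE_WEBHOOKS": 0x20000000,
--       "MANAGE_EMOJIS_AND_STICKERS": 0x40000000,
--       "USE_APPLICATION_COMMANDS": 0x80000000,
--       "REQUEST_TO_SPEAK": 0x100000000,
--       "MANAGE_EVENTS": 0x200000000,
--       "MANAGE_THREADS": 0x400000000,
--       "CREATE_PUBLIC_THREADS": 0x800000000,
--       "CREATE_PRIVATE_THREADS": 0x1000000000,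
--       "USE_EXTERNAL_STICKERS": 0x2000000000,
--       "SEND_MESSAGES_IN_THREADS": 0x4000000000,
--       "USE_EMBEDDED_ACTIVITIES": 0x8000000000,
--       "MODERATE_MEMBERS": 0x10000000000,
--    }
--    has_perms = []
--
--    for p, v in ALL_PERMS.items():
--       if int(perms) & v == v:
--          has_perms.append(p.replace("_", " ").title())
--
--    if contains(has_perms, "Administrator"):
--       return True
--    else:
--       return False
-- ===== SOURCE B (Python) =====
-- def checkPerms(perms: str) -> bool:
--     # ADMINISTRATOR is bit 0x8; test it directly instead of scanning all permissions.
--     return int(perms) & 0x8 == 0x8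
-- ===== Notes on version B (the rewrite author's own statement) =====
-- stated objective: simpler
-- what changed: Replaced the 41-entry permission scan that builds a list of title-cased names and searches it for 'Administrator' with a direct single bitmask test int(perms) & 0x8 == 0x8.
import Mathlib
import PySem

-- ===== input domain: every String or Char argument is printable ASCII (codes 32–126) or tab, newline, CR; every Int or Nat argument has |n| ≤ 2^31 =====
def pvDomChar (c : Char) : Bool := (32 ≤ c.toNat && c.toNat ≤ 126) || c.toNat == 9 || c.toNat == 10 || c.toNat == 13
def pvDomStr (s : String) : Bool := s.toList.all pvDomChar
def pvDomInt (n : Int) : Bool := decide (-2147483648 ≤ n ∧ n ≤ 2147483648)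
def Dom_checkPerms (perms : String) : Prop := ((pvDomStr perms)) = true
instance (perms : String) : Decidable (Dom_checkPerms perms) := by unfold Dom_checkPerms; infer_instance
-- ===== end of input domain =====

-- B replaces A's 41-entry permission scan (build title-cased names, search for "Administrator")
-- with a direct test of the ADMINISTRATOR bit 0x8.

-- ===== PORT A =====
-- ALL_PERMS is a literal dict with distinct keys: under the type convention it ports as the
-- association list in insertion order, and `.items()` iteration is iteration over that list.
def allPerms : List (String × Int) :=
  [("CREATE_INSTANT_INVITE", 0x1), ("KICK_MEMBERS", 0x2), ("BAN_MEMBERS", 0x4),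
   ("ADMINISTRATOR", 0x8), ("MANAGE_CHANNELS", 0x10), ("MANAGE_GUILD", 0x20),
   ("ADD_REACTIONS", 0x40), ("VIEW_AUDIT_LOG", 0x80), ("PRIORITY_SPEAKER", 0x100),
   ("STREAM", 0x200), ("VIEW_CHANNEL", 0x400), ("SEND_MESSAGES", 0x800),
   ("SEND_TTS_MESSAGES", 0x1000), ("MANAGE_MESSAGES", 0x2000), ("EMBED_LINKS", 0x4000),
   ("ATTACH_FILES", 0x8000), ("READ_MESSAGE_HISTORY", 0x10000), ("MENTION_EVERYONE", 0x20000),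
   ("USE_EXTERNAL_EMOJIS", 0x40000), ("VIEW_GUILD_INSIGHTS", 0x80000), ("CONNECT", 0x100000),
   ("SPEAK", 0x200000), ("MUTE_MEMBERS", 0x400000), ("DEAFEN_MEMBERS", 0x800000),
   ("MOVE_MEMBERS", 0x1000000), ("USE_VAD", 0x2000000), ("CHANGE_NICKNAME", 0x4000000),
   ("MANAGE_NICKNAMES", 0x8000000), ("MANAGE_ROLES", 0x10000000), ("MANAGE_WEBHOOKS", 0x20000000),
   ("MANAGE_EMOJIS_AND_STICKERS", 0x40000000), ("USE_APPLICATION_COMMANDS", 0x80000000),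
   ("REQUEST_TO_SPEAK", 0x100000000), ("MANAGE_EVENTS", 0x200000000),
   ("MANAGE_THREADS", 0x400000000), ("CREATE_PUBLIC_THREADS", 0x800000000),
   ("CREATE_PRIVATE_THREADS", 0x1000000000), ("USE_EXTERNAL_STICKERS", 0x2000000000),
   ("SEND_MESSAGES_IN_THREADS", 0x4000000000), ("USE_EMBEDDED_ACTIVITIES", 0x8000000000),
   ("MODERATE_MEMBERS", 0x10000000000)]

-- hand port of str.title() (PySem has none): a cased (here: alphabetic ASCII) character is
-- uppercased after a non-cased character and lowercased otherwise — exact on the ASCII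
-- permission names it is applied to.
def pyTitleChars : List Char → Bool → List Char
  | [], _ => []
  | c :: rest, prevCased =>
    (if prevCased then c.toLower else c.toUpper) :: pyTitleChars rest c.isAlpha

def pyTitle (s : String) : String := String.ofList (pyTitleChars s.toList false)

def checkPerms (perms : String) : Bool :=
  match PySem.Int.ofStr? perms with
  | none => false   -- int(perms) raises ValueError: outside Pre_
  | some n =>
    let hasPerms : List String :=
      allPerms.foldl (fun acc pv =>
        if PySem.Int.band n pv.2 == pv.2 then
          acc ++ [pyTitle (PySem.Str.replace pv.1 "_" " ")]
        else acc) []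
    hasPerms.contains "Administrator"

-- ===== PORT B =====
def checkPerms_alt (perms : String) : Bool :=
  match PySem.Int.ofStr? perms with
  | none => false   -- int(perms) raises ValueError: outside Pre_
  | some n => PySem.Int.band n 0x8 == 0x8

-- ===== PRECONDITION & SPEC =====
-- Pre_ excludes exactly the inputs where int(perms) raises ValueError.
def Pre_checkPerms (perms : String) : Prop := (PySem.Int.ofStr? perms).isSome = true
instance (perms : String) : Decidable (Pre_checkPerms perms) := by unfold Pre_checkPerms; infer_instance
def pvWitness_checkPerms : String := "8"

def Spec_checkPerms (perms : String) (out : Bool) : Prop := out = checkPerms_alt perms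
instance (perms : String) (out : Bool) : Decidable (Spec_checkPerms perms out) := by unfold Spec_checkPerms; infer_instance

-- ===== CLAIM (what is proved, stated in full; the proofs are below) =====
def Claim_equal_checkPerms : Prop := ∀ (perms : String), Dom_checkPerms perms → Pre_checkPerms perms → Spec_checkPerms perms (checkPerms perms)

-- ===== LEMMAS AND PROOFS =====

-- membership in A's accumulated list, via an any over the source pairs
theorem contains_foldl_if (l : List (String × Int)) (acc : List String)
    (p : String × Int → Bool) (f : String × Int → String) (x : String) :
    (l.foldl (fun acc pv => if p pv then acc ++ [f pv] else acc) acc).contains x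
      = (acc.contains x || l.any (fun pv => p pv && f pv == x)) := by
  induction l generalizing acc with
  | nil => simp
  | cons h t ih =>
    simp only [List.foldl_cons, List.any_cons]
    by_cases hp : p h = true
    · rw [if_pos hp, ih]
      by_cases hx : f h = x
      · simp [hx]
        exact Or.inr (Or.inl hp)
      · have hb : (f h == x) = false := beq_eq_false_iff_ne.mpr hx
        simp [hb, Ne.symm hx]
    · rw [if_neg hp, ih]
      simp [hp]

-- only the ADMINISTRATOR entry title-cases to "Administrator"
theorem mem_hasPerms_iff (n : Int) :
    allPerms.any (fun pv => (PySem.Int.band n pv.2 == pv.2) &&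
        (pyTitle (PySem.Str.replace pv.1 "_" " ") == "Administrator"))
      = (PySem.Int.band n 8 == 8) := by
  simp only [allPerms, List.any_cons, List.any_nil,
    show (pyTitle (PySem.Str.replace "CREATE_INSTANT_INVITE" "_" " ") == "Administrator") = false from by decide,
    show (pyTitle (PySem.Str.replace "KICK_MEMBERS" "_" " ") == "Administrator") = false from by decide,
    show (pyTitle (PySem.Str.replace "BAN_MEMBERS" "_" " ") == "Administrator") = false from by decide,
    show (pyTitle (PySem.Str.replace "ADMINISTRATOR" "_" " ") == "Administrator") = true from by decide,
    show (pyTitle (PySem.Str.replace "MANAGE_CHANNELS" "_" " ") == "Administrator") = false from by decide,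
    show (pyTitle (PySem.Str.replace "MANAGE_GUILD" "_" " ") == "Administrator") = false from by decide,
    show (pyTitle (PySem.Str.replace "ADD_REACTIONS" "_" " ") == "Administrator") = false from by decide,
    show (pyTitle (PySem.Str.replace "VIEW_AUDIT_LOG" "_" " ") == "Administrator") = false from by decide,
    show (pyTitle (PySem.Str.replace "PRIORITY_SPEAKER" "_" " ") == "Administrator") = false from by decide,
    show (pyTitle (PySem.Str.replace "STREAM" "_" " ") == "Administrator") = false from by decide,
    show (pyTitle (PySem.Str.replace "VIEW_CHANNEL" "_" " ") == "Administrator") = false from by decide,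
    show (pyTitle (PySem.Str.replace "SEND_MESSAGES" "_" " ") == "Administrator") = false from by decide,
    show (pyTitle (PySem.Str.replace "SEND_TTS_MESSAGES" "_" " ") == "Administrator") = false from by decide,
    show (pyTitle (PySem.Str.replace "MANAGE_MESSAGES" "_" " ") == "Administrator") = false from by decide,
    show (pyTitle (PySem.Str.replace "EMBED_LINKS" "_" " ") == "Administrator") = false from by decide,
    show (pyTitle (PySem.Str.replace "ATTACH_FILES" "_" " ") == "Administrator") = false from by decide,
    show (pyTitle (PySem.Str.replace "READ_MESSAGE_HISTORY" "_" " ") == "Administrator") = false from by decide,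
    show (pyTitle (PySem.Str.replace "MENTION_EVERYONE" "_" " ") == "Administrator") = false from by decide,
    show (pyTitle (PySem.Str.replace "USE_EXTERNAL_EMOJIS" "_" " ") == "Administrator") = false from by decide,
    show (pyTitle (PySem.Str.replace "VIEW_GUILD_INSIGHTS" "_" " ") == "Administrator") = false from by decide,
    show (pyTitle (PySem.Str.replace "CONNECT" "_" " ") == "Administrator") = false from by decide,
    show (pyTitle (PySem.Str.replace "SPEAK" "_" " ") == "Administrator") = false from by decide,
    show (pyTitle (PySem.Str.replace "MUTE_MEMBERS" "_" " ") == "Administrator") = false from by decide,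
    show (pyTitle (PySem.Str.replace "DEAFEN_MEMBERS" "_" " ") == "Administrator") = false from by decide,
    show (pyTitle (PySem.Str.replace "MOVE_MEMBERS" "_" " ") == "Administrator") = false from by decide,
    show (pyTitle (PySem.Str.replace "USE_VAD" "_" " ") == "Administrator") = false from by decide,
    show (pyTitle (PySem.Str.replace "CHANGE_NICKNAME" "_" " ") == "Administrator") = false from by decide,
    show (pyTitle (PySem.Str.replace "MANAGE_NICKNAMES" "_" " ") == "Administrator") = false from by decide,
    show (pyTitle (PySem.Str.replace "MANAGE_ROLES" "_" " ") == "Administrator") = false from by decide,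
    show (pyTitle (PySem.Str.replace "MANAGE_WEBHOOKS" "_" " ") == "Administrator") = false from by decide,
    show (pyTitle (PySem.Str.replace "MANAGE_EMOJIS_AND_STICKERS" "_" " ") == "Administrator") = false from by decide,
    show (pyTitle (PySem.Str.replace "USE_APPLICATION_COMMANDS" "_" " ") == "Administrator") = false from by decide,
    show (pyTitle (PySem.Str.replace "REQUEST_TO_SPEAK" "_" " ") == "Administrator") = false from by decide,
    show (pyTitle (PySem.Str.replace "MANAGE_EVENTS" "_" " ") == "Administrator") = false from by decide,
    show (pyTitle (PySem.Str.replace "MANAGE_THREADS" "_" " ") == "Administrator") = false from by decide,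
    show (pyTitle (PySem.Str.replace "CREATE_PUBLIC_THREADS" "_" " ") == "Administrator") = false from by decide,
    show (pyTitle (PySem.Str.replace "CREATE_PRIVATE_THREADS" "_" " ") == "Administrator") = false from by decide,
    show (pyTitle (PySem.Str.replace "USE_EXTERNAL_STICKERS" "_" " ") == "Administrator") = false from by decide,
    show (pyTitle (PySem.Str.replace "SEND_MESSAGES_IN_THREADS" "_" " ") == "Administrator") = false from by decide,
    show (pyTitle (PySem.Str.replace "USE_EMBEDDED_ACTIVITIES" "_" " ") == "Administrator") = false from by decide,
    show (pyTitle (PySem.Str.replace "MODERATE_MEMBERS" "_" " ") == "Administrator") = false from by decide,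
    Bool.and_false, Bool.and_true, Bool.false_or, Bool.or_false]

theorem checkPerms_spec : Claim_equal_checkPerms := by
  intro perms _ hpre
  unfold Spec_checkPerms checkPerms checkPerms_alt
  cases hof : PySem.Int.ofStr? perms with
  | none => simp [Pre_checkPerms, hof] at hpre
  | some n =>
    simp only [contains_foldl_if, List.contains_nil, Bool.false_or, mem_hasPerms_iff]
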